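-- pv_equiv track=rewrite | github.com/pu2clr/HomeGuard | source/Micropython/grid_monitor_esp32c3/sensor_calibration.py | generate_calibration_report
-- ===== SOURCE A (Python) =====
-- def generate_calibration_report(voltage_history):
--     """
--     Gera relatório de calibração baseado no histórico de tensões
--     """
--     if len(voltage_history) < 10:
--         return "Histórico insuficiente para relatório"
--
--     # Estatísticas básicas
--     min_val = min(voltage_history)
--     max_val = max(voltage_history)
--     avg_val = sum(voltage_history) // len(voltage_history)
--
--     # Variação
--     variations = [abs(voltage_history[i] - voltage_history[i-1])
--                  for i in range(1, len(voltage_history))]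
--     avg_variation = sum(variations) // len(variations) if variations else 0
--     max_variation = max(variations) if variations else 0
--
--     # Análise de estabilidade
--     stable_readings = sum(1 for v in variations if v < 50)  # Variação < 50
--     stability_percent = (stable_readings * 100) // len(variations) if variations else 100
--
--     report = f"""
-- === RELATÓRIO DE CALIBRAÇÃO ZMPT101B ===
-- Período analisado: {len(voltage_history)} leituras
--
-- ESTATÍSTICAS:
-- - Tensão mínima: {min_val}
-- - Tensão máxima: {max_val}
-- - Tensão média: {avg_val}
-- - Faixa de variação: {max_val - min_val}
--
-- VARIABILIDADE:
-- - Variação média: {avg_variation}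
-- - Variação máxima: {max_variation}
-- - Estabilidade: {stability_percent}%
--
-- RECOMENDAÇÕES:
-- """
--
--     # Recomendações baseadas na análise
--     if stability_percent > 80:
--         report += "- Sensor estável, thresholds atuais provavelmente adequados\n"
--     elif stability_percent > 60:
--         report += "- Sensor moderadamente estável, considerar aumentar MIN_STABLE_READINGS\n"
--     else:
--         report += "- Sensor instável, recomendado usar preset RURAL_INSTAVEL\n"
--
--     if max_variation > 200:
--         report += "- Alta variação detectada, aumentar hysteresis\n"
--
--     if (max_val - min_val) < 500:
--         report += "- Baixa faixa de variação, verificar conexões do sensor\n"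
--
--     report += f"\nTHRESHOLDS SUGERIDOS:\n"
--     report += f"- GRID_THRESHOLD_HIGH: {avg_val + (max_val - avg_val) // 2}\n"
--     report += f"- GRID_THRESHOLD_LOW: {avg_val - (avg_val - min_val) // 2}\n"
--
--     return report
-- ===== SOURCE B (Python) =====
-- def generate_calibration_report(voltage_history):
--     """
--     Gera relatório de calibração baseado no histórico de tensões
--     (single fused pass over the history)
--     """
--     n = len(voltage_history)
--     if n < 10:
--         return "Histórico insuficiente para relatório"
--
--     first = voltage_history[0]
--     min_val = first
--     max_val = first
--     total = first
--     prev = first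
--     variation_total = 0
--     max_variation = 0
--     stable_readings = 0
--     for v in voltage_history[1:]:
--         if v < min_val:
--             min_val = v
--         if v > max_val:
--             max_val = v
--         total += v
--         d = abs(v - prev)
--         variation_total += d
--         if d > max_variation:
--             max_variation = d
--         if d < 50:
--             stable_readings += 1
--         prev = v
--
--     avg_val = total // n
--     avg_variation = variation_total // (n - 1)
--     stability_percent = (stable_readings * 100) // (n - 1)
--
--     report = f"""
-- === RELATÓRIO DE CALIBRAÇÃO ZMPT101B ===
-- Período analisado: {n} leituras
--
-- ESTATÍSTICAS:
-- - Tensão mínima: {min_val}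
-- - Tensão máxima: {max_val}
-- - Tensão média: {avg_val}
-- - Faixa de variação: {max_val - min_val}
--
-- VARIABILIDADE:
-- - Variação média: {avg_variation}
-- - Variação máxima: {max_variation}
-- - Estabilidade: {stability_percent}%
--
-- RECOMENDAÇÕES:
-- """
--
--     if stability_percent > 80:
--         report += "- Sensor estável, thresholds atuais provavelmente adequados\n"
--     elif stability_percent > 60:
--         report += "- Sensor moderadamente estável, considerar aumentar MIN_STABLE_READINGS\n"
--     else:
--         report += "- Sensor instável, recomendado usar preset RURAL_INSTAVEL\n"
--
--     if max_variation > 200: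
--         report += "- Alta variação detectada, aumentar hysteresis\n"
--
--     if (max_val - min_val) < 500:
--         report += "- Baixa faixa de variação, verificar conexões do sensor\n"
--
--     report += f"\nTHRESHOLDS SUGERIDOS:\n"
--     report += f"- GRID_THRESHOLD_HIGH: {avg_val + (max_val - avg_val) // 2}\n"
--     report += f"- GRID_THRESHOLD_LOW: {avg_val - (avg_val - min_val) // 2}\n"
--
--     return report
-- ===== Notes on version B (the rewrite author's own statement) =====
-- stated objective: alternative
-- what changed: Replaces A's seven separate passes (min, max, sum, the variations comprehension, then sum/max/count over it) with a single fold over the history carrying min, max, total, previous value, variation total, max variation and stable count (no intermediate variations list is built); the len>=10 guard makes the 'if variations' fallbacks dead, so B drops them.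
import Mathlib
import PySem

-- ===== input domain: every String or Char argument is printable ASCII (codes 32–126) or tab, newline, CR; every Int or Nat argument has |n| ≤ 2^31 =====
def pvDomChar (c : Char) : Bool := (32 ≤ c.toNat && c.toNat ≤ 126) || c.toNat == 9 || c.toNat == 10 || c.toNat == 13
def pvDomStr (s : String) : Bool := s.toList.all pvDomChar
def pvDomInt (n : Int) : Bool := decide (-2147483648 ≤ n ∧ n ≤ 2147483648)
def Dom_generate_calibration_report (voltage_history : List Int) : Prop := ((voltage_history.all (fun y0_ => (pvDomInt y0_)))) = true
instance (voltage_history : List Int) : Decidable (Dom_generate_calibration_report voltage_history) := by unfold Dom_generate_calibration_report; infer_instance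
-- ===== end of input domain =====

-- B fuses A's seven passes (min, max, sum, the variations comprehension, and the
-- three passes over it) into one loop over the history; the report text is unchanged.

-- ===== PORT A =====
-- A: seven separate passes; min()/max() via PySem.List.min?/max? (.getD 0 is never
-- used: the list has ≥ 10 elements on this branch, so min?/max? are `some`).
def generate_calibration_report (voltage_history : List Int) : String :=
  if voltage_history.length < 10 then "Histórico insuficiente para relatório"
  else
    let min_val : Int := (PySem.List.min? voltage_history (fun y => y)).getD 0
    let max_val : Int := (PySem.List.max? voltage_history (fun y => y)).getD 0
    let avg_val : Int := PySem.Int.floordiv voltage_history.sum (voltage_history.length : Int)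
    let variations : List Int :=
      (PySem.List.pyRange 1 (voltage_history.length : Int) 1).map
        (fun i => |PySem.List.pyGetD voltage_history i 0 - PySem.List.pyGetD voltage_history (i - 1) 0|)
    let avg_variation : Int :=
      if variations ≠ [] then PySem.Int.floordiv variations.sum (variations.length : Int) else 0
    let max_variation : Int :=
      if variations ≠ [] then (PySem.List.max? variations (fun y => y)).getD 0 else 0
    let stable_readings : Int :=
      variations.foldl (fun acc v => if v < 50 then acc + 1 else acc) 0
    let stability_percent : Int :=
      if variations ≠ [] then PySem.Int.floordiv (stable_readings * 100) (variations.length : Int) else 100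
    let report : String :=
      "\n=== RELATÓRIO DE CALIBRAÇÃO ZMPT101B ===\nPeríodo analisado: "
        ++ PySem.Int.toStr (voltage_history.length : Int) ++ " leituras\n\nESTATÍSTICAS:\n- Tensão mínima: "
        ++ PySem.Int.toStr min_val ++ "\n- Tensão máxima: "
        ++ PySem.Int.toStr max_val ++ "\n- Tensão média: "
        ++ PySem.Int.toStr avg_val ++ "\n- Faixa de variação: "
        ++ PySem.Int.toStr (max_val - min_val) ++ "\n\nVARIABILIDADE:\n- Variação média: "
        ++ PySem.Int.toStr avg_variation ++ "\n- Variação máxima: "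
        ++ PySem.Int.toStr max_variation ++ "\n- Estabilidade: "
        ++ PySem.Int.toStr stability_percent ++ "%\n\nRECOMENDAÇÕES:\n"
    let report := report ++
      (if stability_percent > 80 then "- Sensor estável, thresholds atuais provavelmente adequados\n"
       else if stability_percent > 60 then "- Sensor moderadamente estável, considerar aumentar MIN_STABLE_READINGS\n"
       else "- Sensor instável, recomendado usar preset RURAL_INSTAVEL\n")
    let report := report ++
      (if max_variation > 200 then "- Alta variação detectada, aumentar hysteresis\n" else "")
    let report := report ++
      (if max_val - min_val < 500 then "- Baixa faixa de variação, verificar conexões do sensor\n" else "")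
    let report := report ++ "\nTHRESHOLDS SUGERIDOS:\n"
    let report := report ++ "- GRID_THRESHOLD_HIGH: "
        ++ PySem.Int.toStr (avg_val + PySem.Int.floordiv (max_val - avg_val) 2) ++ "\n"
    let report := report ++ "- GRID_THRESHOLD_LOW: "
        ++ PySem.Int.toStr (avg_val - PySem.Int.floordiv (avg_val - min_val) 2) ++ "\n"
    report

-- ===== PORT B =====
-- B: one fold over voltage_history[1:] carrying
-- (min_val, max_val, total, prev, variation_total, max_variation, stable_readings).
def pvStep (s : Int × Int × Int × Int × Int × Int × Int) (v : Int) :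
    Int × Int × Int × Int × Int × Int × Int :=
  let mn := if v < s.1 then v else s.1
  let mx := if v > s.2.1 then v else s.2.1
  let tot := s.2.2.1 + v
  let d := |v - s.2.2.2.1|
  let vt := s.2.2.2.2.1 + d
  let mv := if d > s.2.2.2.2.2.1 then d else s.2.2.2.2.2.1
  let sr := if d < 50 then s.2.2.2.2.2.2 + 1 else s.2.2.2.2.2.2
  (mn, mx, tot, v, vt, mv, sr)

def generate_calibration_report_alt (voltage_history : List Int) : String :=
  let n : Int := (voltage_history.length : Int)
  if n < 10 then "Histórico insuficiente para relatório"
  else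
    let first : Int := PySem.List.pyGetD voltage_history 0 0
    let st := (PySem.List.slice voltage_history (some 1) none).foldl pvStep
      (first, first, first, first, 0, 0, 0)
    let min_val := st.1
    let max_val := st.2.1
    let avg_val : Int := PySem.Int.floordiv st.2.2.1 n
    let avg_variation : Int := PySem.Int.floordiv st.2.2.2.2.1 (n - 1)
    let max_variation := st.2.2.2.2.2.1
    let stability_percent : Int := PySem.Int.floordiv (st.2.2.2.2.2.2 * 100) (n - 1)
    let report : String :=
      "\n=== RELATÓRIO DE CALIBRAÇÃO ZMPT101B ===\nPeríodo analisado: "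
        ++ PySem.Int.toStr n ++ " leituras\n\nESTATÍSTICAS:\n- Tensão mínima: "
        ++ PySem.Int.toStr min_val ++ "\n- Tensão máxima: "
        ++ PySem.Int.toStr max_val ++ "\n- Tensão média: "
        ++ PySem.Int.toStr avg_val ++ "\n- Faixa de variação: "
        ++ PySem.Int.toStr (max_val - min_val) ++ "\n\nVARIABILIDADE:\n- Variação média: "
        ++ PySem.Int.toStr avg_variation ++ "\n- Variação máxima: "
        ++ PySem.Int.toStr max_variation ++ "\n- Estabilidade: "
        ++ PySem.Int.toStr stability_percent ++ "%\n\nRECOMENDAÇÕES:\n"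
    let report := report ++
      (if stability_percent > 80 then "- Sensor estável, thresholds atuais provavelmente adequados\n"
       else if stability_percent > 60 then "- Sensor moderadamente estável, considerar aumentar MIN_STABLE_READINGS\n"
       else "- Sensor instável, recomendado usar preset RURAL_INSTAVEL\n")
    let report := report ++
      (if max_variation > 200 then "- Alta variação detectada, aumentar hysteresis\n" else "")
    let report := report ++
      (if max_val - min_val < 500 then "- Baixa faixa de variação, verificar conexões do sensor\n" else "")
    let report := report ++ "\nTHRESHOLDS SUGERIDOS:\n"
    let report := report ++ "- GRID_THRESHOLD_HIGH: "
        ++ PySem.Int.toStr (avg_val + PySem.Int.floordiv (max_val - avg_val) 2) ++ "\n"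
    let report := report ++ "- GRID_THRESHOLD_LOW: "
        ++ PySem.Int.toStr (avg_val - PySem.Int.floordiv (avg_val - min_val) 2) ++ "\n"
    report

-- ===== PRECONDITION & SPEC =====
def Spec_generate_calibration_report (voltage_history : List Int) (out : String) : Prop := out = generate_calibration_report_alt voltage_history
instance (voltage_history : List Int) (out : String) : Decidable (Spec_generate_calibration_report voltage_history out) := by unfold Spec_generate_calibration_report; infer_instance

-- ===== CLAIM (what is proved, stated in full; the proofs are below) =====
def Claim_equal_generate_calibration_report : Prop := ∀ (voltage_history : List Int), Dom_generate_calibration_report voltage_history → Spec_generate_calibration_report voltage_history (generate_calibration_report voltage_history)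

-- ===== LEMMAS AND PROOFS =====

-- adjacent absolute differences of prev :: rest
def adjDiffs (prev : Int) : List Int → List Int
  | [] => []
  | v :: t => |v - prev| :: adjDiffs v t

theorem adjDiffs_length (prev : Int) (l : List Int) : (adjDiffs prev l).length = l.length := by
  induction l generalizing prev with
  | nil => rfl
  | cons v t ih => simp [adjDiffs, ih]

-- the fused fold is the tuple of the independent folds
theorem foldl_pvStep (rest : List Int) :
    ∀ (mn mx tot prev vt mv sr : Int),
    rest.foldl pvStep (mn, mx, tot, prev, vt, mv, sr) =
      (rest.foldl (fun m v => if v < m then v else m) mn,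
       rest.foldl (fun m v => if v > m then v else m) mx,
       rest.foldl (· + ·) tot,
       (prev :: rest).getLast (by simp),
       (adjDiffs prev rest).foldl (· + ·) vt,
       (adjDiffs prev rest).foldl (fun m d => if d > m then d else m) mv,
       (adjDiffs prev rest).foldl (fun a d => if d < 50 then a + 1 else a) sr) := by
  induction rest with
  | nil => intro mn mx tot prev vt mv sr; simp [adjDiffs]
  | cons v t ih =>
      intro mn mx tot prev vt mv sr
      simp only [List.foldl_cons, adjDiffs, pvStep, ih]
      rcases t with _ | ⟨w, u⟩ <;> simp

theorem foldl_min_eq (l : List Int) : ∀ a : Int,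
    l.foldl (fun m v => if v < m then v else m) a = l.foldl min a := by
  induction l with
  | nil => intro a; rfl
  | cons v t ih =>
      intro a
      simp only [List.foldl_cons, ih]
      congr 1
      rcases lt_or_ge v a with h | h
      · simp [h, min_eq_right h.le]
      · simp [not_lt.mpr h, min_eq_left h]

theorem foldl_max_eq (l : List Int) : ∀ a : Int,
    l.foldl (fun m v => if v > m then v else m) a = l.foldl max a := by
  induction l with
  | nil => intro a; rfl
  | cons v t ih =>
      intro a
      simp only [List.foldl_cons, ih]
      congr 1
      rcases lt_or_ge a v with h | h
      · simp [h, max_eq_right h.le]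
      · simp [not_lt.mpr h, max_eq_left h]

theorem foldl_add_eq (l : List Int) : ∀ a : Int, l.foldl (· + ·) a = a + l.sum := by
  induction l with
  | nil => intro a; simp
  | cons v t ih => intro a; simp only [List.foldl_cons, ih, List.sum_cons]; ring

theorem pyGetD_cons_shift (a : Int) (l : List Int) (i : Int) (h : 0 ≤ i) :
    PySem.List.pyGetD (a :: l) (i + 1) 0 = PySem.List.pyGetD l i 0 := by
  lift i to Nat using h with n
  have e : (n : Int) + 1 = (((n + 1 : Nat)) : Int) := by push_cast; ring
  rw [e, PySem.List.pyGetD_natCast, PySem.List.pyGetD_natCast]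
  simp [List.getD]

-- A's comprehension over range(1, len) equals adjDiffs
theorem variations_eq (x : Int) (rest : List Int) :
    (PySem.List.pyRange 1 ((x :: rest).length : Int) 1).map
        (fun i => |PySem.List.pyGetD (x :: rest) i 0 - PySem.List.pyGetD (x :: rest) (i - 1) 0|)
      = adjDiffs x rest := by
  induction rest generalizing x with
  | nil => simp [PySem.List.pyRange_one_eq_nil, adjDiffs]
  | cons v t ih =>
      have h1 : (1 : Int) < ((x :: v :: t).length : Int) := by push_cast [List.length_cons]; omega
      rw [PySem.List.pyRange_one_cons h1]
      simp only [List.map_cons, adjDiffs]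
      refine List.cons_eq_cons.mpr ⟨?_, ?_⟩
      · have hA : PySem.List.pyGetD (x :: v :: t) 1 0 = v := by
          have h := pyGetD_cons_shift x (v :: t) 0 le_rfl
          rw [zero_add] at h
          rw [h, PySem.List.pyGetD_zero_cons]
        rw [show (1 : Int) - 1 = 0 by ring, PySem.List.pyGetD_zero_cons, hA]
      · rw [← ih v]
        rw [PySem.List.pyRange_one, PySem.List.pyRange_one]
        have hm : ((((x :: v :: t).length : Int)) - (1 + 1)).toNat = ((((v :: t).length : Int)) - 1).toNat := by
          push_cast [List.length_cons]; omega
        rw [hm, List.map_map, List.map_map]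
        refine List.map_congr_left (fun k _ => ?_)
        simp only [Function.comp]
        rw [show (1 : Int) + 1 + (k : Int) - 1 = ((1 : Int) + k - 1) + 1 by ring,
            show (1 : Int) + 1 + (k : Int) = ((1 : Int) + k) + 1 by ring,
            pyGetD_cons_shift x _ _ (by omega), pyGetD_cons_shift x _ _ (by omega)]

theorem generate_calibration_report_spec : Claim_equal_generate_calibration_report := by
  intro xs _
  unfold Spec_generate_calibration_report
  by_cases hlen : xs.length < 10
  · have hlen' : ((xs.length : Int)) < 10 := by exact_mod_cast hlen
    simp [generate_calibration_report, generate_calibration_report_alt, hlen, hlen']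
  · replace hlen : 10 ≤ xs.length := by omega
    obtain ⟨x, w, u, rfl⟩ : ∃ x w u, xs = x :: w :: u := by
      match xs, hlen with
      | x :: w :: u, _ => exact ⟨x, w, u, rfl⟩
    have hlen' : ¬ (((x :: w :: u).length : Int) < 10) := by push_cast [List.length_cons] at hlen ⊢; omega
    have hlenN : ¬ ((x :: w :: u).length < 10) := by omega
    have hslice : PySem.List.slice (x :: w :: u) (some 1) none = w :: u := by
      rw [PySem.List.slice_from_one]; rfl
    have hfirst : PySem.List.pyGetD (x :: w :: u) 0 0 = x := PySem.List.pyGetD_zero_cons x (w :: u) 0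
    have hfold := foldl_pvStep (w :: u) x x x x 0 0 0
    have hvar := variations_eq x (w :: u)
    have hmin : (PySem.List.min? (x :: w :: u) (fun y => y)).getD 0 = (w :: u).foldl min x := by
      rw [PySem.List.min?_id_cons]; rfl
    have hmax : (PySem.List.max? (x :: w :: u) (fun y => y)).getD 0 = (w :: u).foldl max x := by
      rw [PySem.List.max?_id_cons]; rfl
    have hne : adjDiffs x (w :: u) ≠ [] := by simp [adjDiffs]
    have hden : (((x :: w :: u).length : Int)) - 1 = (((adjDiffs x (w :: u)).length : Int)) := by
      rw [adjDiffs_length]; push_cast [List.length_cons]; omega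
    have h0 : max 0 |w - x| = |w - x| := max_eq_right (abs_nonneg _)
    have hmv : (adjDiffs x (w :: u)).foldl (fun m d => if d > m then d else m) 0
        = (PySem.List.max? (adjDiffs x (w :: u)) (fun y => y)).getD 0 := by
      have ha : adjDiffs x (w :: u) = |w - x| :: adjDiffs w u := rfl
      rw [foldl_max_eq, ha, PySem.List.max?_id_cons, Option.getD_some, List.foldl_cons, h0]
    simp only [generate_calibration_report, generate_calibration_report_alt,
      hslice, hfirst, hfold, hvar, hmin, hmax, hmv, hden,
      if_neg hlen', if_neg hlenN, ne_eq, hne, not_false_eq_true, if_true,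
      foldl_min_eq, foldl_max_eq, foldl_add_eq, zero_add, List.sum_cons]
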